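-- pv_equiv track=rewrite | github.com/princessV/lab-for-SVA | hw2/appendix/scripts/myparser.py | readSkip
-- ===== SOURCE A (Python) =====
-- def readSkip(buffer):
--     ba = [hex(x) for x in buffer]
--     strs = ''
--     for x in ba:
--         if int(x, 16) <= 0xff:
--
--             if int(x, 16) == 0x1 or int(x, 16) == 0x2 or int(x, 16) == 0x3 or int(x, 16) == 0x4 or int(x, 16) == 0x5:
--                 continue
--             strs += chr(int(x, 16))
--     return strs;
-- ===== SOURCE B (Python) =====
-- def readSkip(buffer):
--     data = bytes(x for x in buffer if x <= 0xff)
--     return data.translate(None, bytes(range(1, 6))).decode('latin-1')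
-- ===== Notes on version B (the rewrite author's own statement) =====
-- stated objective: idiomatic
-- what changed: Replaces the per-element hex round-trip, membership test and chr-concatenation loop with one bulk pass: pre-filter values > 0xff, build a bytes object, delete bytes 1-5 with translate, and decode as latin-1.
import Mathlib
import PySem

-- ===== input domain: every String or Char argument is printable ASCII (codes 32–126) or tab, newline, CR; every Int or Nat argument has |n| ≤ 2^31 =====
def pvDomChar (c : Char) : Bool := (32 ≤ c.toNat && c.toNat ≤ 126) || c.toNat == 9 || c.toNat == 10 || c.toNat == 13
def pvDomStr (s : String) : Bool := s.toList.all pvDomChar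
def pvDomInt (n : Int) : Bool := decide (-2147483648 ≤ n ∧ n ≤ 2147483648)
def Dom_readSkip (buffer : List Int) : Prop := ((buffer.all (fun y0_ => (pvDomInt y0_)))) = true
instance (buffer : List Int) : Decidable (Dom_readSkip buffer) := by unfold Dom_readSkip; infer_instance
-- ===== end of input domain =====

-- B replaces A's per-element hex round-trip / membership / chr-concatenation loop with a
-- bulk filter-then-delete pass (bytes + translate + latin-1 decode); idiomatic, same cost.

-- ===== PORT A =====
-- A's `hex(x)` followed by `int(x, 16)` is the identity on Int, so the round-trip is
-- ported as the value itself; `chr(n)` (0 ≤ n ≤ 255 under Pre_) is Char.ofNat n.toNat.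
def readSkip (buffer : List Int) : String :=
  let ba := buffer.map (fun x => x)   -- hex()/int(·,16) round trip: identity
  ba.foldl (fun strs x =>
    if x ≤ 0xff then
      if x = 0x1 ∨ x = 0x2 ∨ x = 0x3 ∨ x = 0x4 ∨ x = 0x5 then strs
      else strs ++ (Char.ofNat x.toNat).toString
    else strs) ""

-- ===== PORT B =====
-- bytes(x for x in buffer if x <= 0xff), translate-delete bytes 1..5, decode latin-1
def readSkip_alt (buffer : List Int) : String :=
  let data := buffer.filter (fun x => x ≤ 0xff)
  String.ofList ((data.filter (fun x => x ∉ ([1, 2, 3, 4, 5] : List Int))).map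
    (fun x => Char.ofNat x.toNat))

-- ===== PRECONDITION & SPEC =====
-- Pre_ excludes buffers with a negative element: there Python A raises ValueError (chr)
-- and Python B also raises ValueError (bytes range check).
def Pre_readSkip (buffer : List Int) : Prop := ∀ x ∈ buffer, 0 ≤ x
instance (buffer : List Int) : Decidable (Pre_readSkip buffer) := by unfold Pre_readSkip; infer_instance
def pvWitness_readSkip : List Int := [72, 1, 105, 3, 300, 33]

def Spec_readSkip (buffer : List Int) (out : String) : Prop := out = readSkip_alt buffer
instance (buffer : List Int) (out : String) : Decidable (Spec_readSkip buffer out) := by unfold Spec_readSkip; infer_instance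

-- ===== CLAIM (what is proved, stated in full; the proofs are below) =====
def Claim_equal_readSkip : Prop := ∀ (buffer : List Int), Dom_readSkip buffer → Pre_readSkip buffer → Spec_readSkip buffer (readSkip buffer)

-- ===== LEMMAS AND PROOFS =====

theorem readSkip_loop (l : List Int) (s : String) :
    (l.foldl (fun strs x =>
      if x ≤ 0xff then
        if x = 0x1 ∨ x = 0x2 ∨ x = 0x3 ∨ x = 0x4 ∨ x = 0x5 then strs
        else strs ++ (Char.ofNat x.toNat).toString
      else strs) s).toList
    = s.toList ++ (((l.filter (fun x => x ≤ 0xff)).filter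
        (fun x => x ∉ ([1, 2, 3, 4, 5] : List Int))).map (fun x => Char.ofNat x.toNat)) := by
  induction l generalizing s with
  | nil => simp
  | cons x l ih =>
    simp only [List.foldl_cons]
    by_cases h1 : x ≤ 0xff
    · by_cases h2 : x = 0x1 ∨ x = 0x2 ∨ x = 0x3 ∨ x = 0x4 ∨ x = 0x5
      · have hm : x ∈ ([1, 2, 3, 4, 5] : List Int) := by
          rcases h2 with h | h | h | h | h <;> simp [h]
        have hc : ¬(¬x = 1 ∧ ¬x = 2 ∧ ¬x = 3 ∧ ¬x = 4 ∧ ¬x = 5) := by tauto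
        simp only [if_pos h1, if_pos h2, ih]
        simp [h1, hc]
      · have hm : x ∉ ([1, 2, 3, 4, 5] : List Int) := by
          intro hx; exact h2 (by simpa using hx)
        have hc : ¬x = 1 ∧ ¬x = 2 ∧ ¬x = 3 ∧ ¬x = 4 ∧ ¬x = 5 := by tauto
        simp only [if_pos h1, if_neg h2, ih]
        simp [h1, hc]
    · simp only [if_neg h1, ih]
      simp [h1]

-- ===== VERDICT (by name: the statement is the Claim_ definition above) =====
theorem readSkip_spec : Claim_equal_readSkip := by
  intro buffer _ _
  unfold Spec_readSkip readSkip readSkip_alt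
  apply String.toList_inj.mp
  simpa using readSkip_loop buffer ""
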